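-- pv_equiv track=rewrite | github.com/tentacl-ai/seo-autopilot | seo_autopilot/analyzers/delta.py | _group_by_url
-- ===== SOURCE A (Python) =====
-- from typing import Any, Dict, List, Optional, Set
--
-- def _group_by_url(issues: List[Dict[str, Any]]) -> Dict[str, List[Dict]]:
--     """Groups issues by affected_url."""
--     groups: Dict[str, List[Dict]] = {}
--     for issue in issues:
--         url = issue.get("affected_url", "")
--         if url not in groups:
--             groups[url] = []
--         groups[url].append(issue)
--     return groups
-- ===== SOURCE B (Python) =====
-- def _group_by_url(issues):
--     """Groups issues by affected_url: first-seen key order, then one filter pass per key."""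
--     urls = list(dict.fromkeys(issue.get("affected_url", "") for issue in issues))
--     return {url: [issue for issue in issues
--                   if issue.get("affected_url", "") == url]
--             for url in urls}
-- ===== Notes on version B (the rewrite author's own statement) =====
-- stated objective: alternative
-- what changed: Instead of one pass mutating a dict of accumulating lists, B first computes the distinct urls in first-seen order (dict.fromkeys) and then builds each group by a filter comprehension over the whole list.
import Mathlib
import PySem

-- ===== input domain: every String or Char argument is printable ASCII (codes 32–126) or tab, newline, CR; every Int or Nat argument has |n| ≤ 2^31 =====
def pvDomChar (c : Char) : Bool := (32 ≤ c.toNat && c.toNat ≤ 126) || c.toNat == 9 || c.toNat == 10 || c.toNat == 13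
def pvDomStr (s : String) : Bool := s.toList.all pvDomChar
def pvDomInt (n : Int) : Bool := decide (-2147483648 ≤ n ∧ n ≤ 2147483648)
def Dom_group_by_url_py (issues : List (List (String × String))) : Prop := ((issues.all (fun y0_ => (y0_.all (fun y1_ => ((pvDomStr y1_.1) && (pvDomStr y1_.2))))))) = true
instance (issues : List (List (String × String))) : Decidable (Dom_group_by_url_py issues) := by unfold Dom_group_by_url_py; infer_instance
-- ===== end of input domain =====

-- ===== PORT A =====
-- shared primitive: issue.get("affected_url", "") (first match in the assoc list)
def pvKey (issue : List (String × String)) : String :=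
  (PySem.Dict.mk issue).getD "affected_url" ""

-- A: one pass; ensure the key exists, then append the issue to its list; return the dict's items
def group_by_url_py (issues : List (List (String × String))) : List (String × List (List (String × String))) :=
  (issues.foldl
    (fun (groups : PySem.Dict String (List (List (String × String)))) issue =>
      let url := pvKey issue
      let groups := if groups.contains url then groups else groups.insert url []
      groups.modify url [] (fun l => l ++ [issue]))
    PySem.Dict.empty).items

-- ===== PORT B =====
-- B: distinct urls in first-seen order, then one filter pass per url
def group_by_url_py_alt (issues : List (List (String × String))) : List (String × List (List (String × String))) :=
  let urls := PySem.List.dedup (issues.map pvKey)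
  urls.map (fun url => (url, issues.filter (fun issue => pvKey issue == url)))

-- ===== PRECONDITION & SPEC =====
def Spec_group_by_url_py (issues : List (List (String × String))) (out : List (String × List (List (String × String)))) : Prop := out = group_by_url_py_alt issues
instance (issues : List (List (String × String))) (out : List (String × List (List (String × String)))) : Decidable (Spec_group_by_url_py issues out) := by unfold Spec_group_by_url_py; infer_instance

-- ===== CLAIM (what is proved, stated in full; the proofs are below) =====
def Claim_equal_group_by_url_py : Prop := ∀ (issues : List (List (String × String))), Dom_group_by_url_py issues → Spec_group_by_url_py issues (group_by_url_py issues)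

-- ===== LEMMAS AND PROOFS =====

-- A's loop body, as a plain modify: the "ensure key" insert is absorbed
theorem pv_step_eq (g : PySem.Dict String (List (List (String × String))))
    (issue : List (String × String)) :
    (let url := pvKey issue
     let g' := if g.contains url then g else g.insert url []
     g'.modify url [] (fun l => l ++ [issue]))
    = g.modify (pvKey issue) [] (fun l => l ++ [issue]) := by
  by_cases h : g.contains (pvKey issue) = true
  · simp [h]
  · have hf : g.contains (pvKey issue) = false := Bool.eq_false_iff.mpr h
    simp [hf, PySem.Dict.modify, PySem.Dict.getD_insert_self,
      PySem.Dict.insert_insert_self, PySem.Dict.getD_of_not_contains g [] hf]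

theorem pv_foldl_eq (issues : List (List (String × String))) :
    issues.foldl
      (fun (groups : PySem.Dict String (List (List (String × String)))) issue =>
        let url := pvKey issue
        let groups := if groups.contains url then groups else groups.insert url []
        groups.modify url [] (fun l => l ++ [issue]))
      PySem.Dict.empty
    = issues.foldl (fun g issue => g.modify (pvKey issue) [] (fun l => l ++ [issue]))
        PySem.Dict.empty := by
  congr 1
  funext g issue
  exact pv_step_eq g issue

theorem pv_getD (issues : List (List (String × String))) (u : String) :
    (issues.foldl (fun g issue => g.modify (pvKey issue) [] (fun l => l ++ [issue]))
        PySem.Dict.empty).getD u []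
    = issues.filter (fun issue => pvKey issue == u) := by
  have h := PySem.Dict.getD_foldl_modify_append
    (l := issues.map (fun issue => (pvKey issue, issue)))
    (d := (PySem.Dict.empty : PySem.Dict String (List (List (String × String))))) (c := u)
  rw [List.foldl_map] at h
  exact h.trans (by simp [List.filter_map, List.map_map, Function.comp_def])

theorem pv_keys (issues : List (List (String × String))) :
    (issues.foldl (fun g issue => g.modify (pvKey issue) [] (fun l => l ++ [issue]))
        PySem.Dict.empty).keys
    = PySem.List.dedup (issues.map pvKey) := by
  rw [PySem.Dict.keys_foldl_modify_key]
  simp [PySem.Set.update_nil_left]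

theorem pv_nodup_keys (issues : List (List (String × String))) :
    (issues.foldl (fun g issue => g.modify (pvKey issue) [] (fun l => l ++ [issue]))
        PySem.Dict.empty).keys.Nodup := by
  rw [pv_keys]
  exact PySem.List.nodup_dedup _

-- ===== VERDICT (by name: the statement is the Claim_ definition above) =====
theorem group_by_url_py_spec : Claim_equal_group_by_url_py := by
  intro issues _
  unfold Spec_group_by_url_py group_by_url_py group_by_url_py_alt
  rw [pv_foldl_eq]
  rw [PySem.Dict.items_eq_map_keys _ (pv_nodup_keys issues) []]
  rw [pv_keys]
  refine List.map_congr_left (fun u _ => ?_)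
  rw [pv_getD]
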